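-- pv_equiv track=rewrite | github.com/dsiggi/python-flicker | flicker/decode_flicker.py | Frame2Hex
-- ===== SOURCE A (Python) =====
-- def Frame2Hex(frame: list):
--     op = 1
--     val = 0
--     for i in frame[1:]:
--         if i:
--             val += op
--         op *= 2
--
--     return val
-- ===== SOURCE B (Python) =====
-- def Frame2Hex(frame: list):
--     val = 0
--     for bit in reversed(frame[1:]):
--         val = val * 2 + (1 if bit else 0)
--     return val
-- ===== Notes on version B (the rewrite author's own statement) =====
-- stated objective: alternative
-- what changed: Replaces LSB-first accumulation with an explicit power-of-two variable by Horner's method over the bits in reverse (MSB-first repeated doubling), eliminating the op variable.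
import Mathlib
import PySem

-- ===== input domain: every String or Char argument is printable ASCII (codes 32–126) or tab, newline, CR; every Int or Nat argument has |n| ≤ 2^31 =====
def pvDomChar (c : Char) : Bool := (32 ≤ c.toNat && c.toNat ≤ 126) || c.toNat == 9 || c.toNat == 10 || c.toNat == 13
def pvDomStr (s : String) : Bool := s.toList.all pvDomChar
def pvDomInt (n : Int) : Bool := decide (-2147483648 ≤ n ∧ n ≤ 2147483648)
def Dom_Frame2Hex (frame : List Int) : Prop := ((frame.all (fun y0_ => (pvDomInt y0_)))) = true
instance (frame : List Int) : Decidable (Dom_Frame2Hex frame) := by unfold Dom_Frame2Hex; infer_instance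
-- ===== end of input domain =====

-- B replaces A's LSB-first accumulation (with a power-of-two variable) by Horner's
-- method over the bits in reverse; alternative decomposition, same return value.

-- ===== PORT A =====
-- op = 1; val = 0; for i in frame[1:]: if i: val += op; op *= 2; return val
def Frame2Hex (frame : List Int) : Int :=
  let st := (PySem.List.slice frame (some 1) none).foldl
    (fun (s : Int × Int) (i : Int) =>
      let val := if i ≠ 0 then s.2 + s.1 else s.2
      (s.1 * 2, val)) (1, 0)
  st.2

-- ===== PORT B =====
-- val = 0; for bit in reversed(frame[1:]): val = val * 2 + (1 if bit else 0); return val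
def Frame2Hex_alt (frame : List Int) : Int :=
  (PySem.List.slice frame (some 1) none).reverse.foldl
    (fun (val : Int) (bit : Int) => val * 2 + (if bit ≠ 0 then 1 else 0)) 0

-- ===== PRECONDITION & SPEC =====
def Spec_Frame2Hex (frame : List Int) (out : Int) : Prop := out = Frame2Hex_alt frame
instance (frame : List Int) (out : Int) : Decidable (Spec_Frame2Hex frame out) := by unfold Spec_Frame2Hex; infer_instance

-- ===== CLAIM (what is proved, stated in full; the proofs are below) =====
def Claim_equal_Frame2Hex : Prop := ∀ (frame : List Int), Dom_Frame2Hex frame → Spec_Frame2Hex frame (Frame2Hex frame)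

-- ===== LEMMAS AND PROOFS =====

theorem frame2hex_fold_eq (l : List Int) (op val : Int) :
    (l.foldl (fun (s : Int × Int) (i : Int) =>
      let v := if i ≠ 0 then s.2 + s.1 else s.2
      (s.1 * 2, v)) (op, val)).2
    = val + op * l.foldr (fun (bit : Int) (v : Int) => v * 2 + (if bit ≠ 0 then 1 else 0)) 0 := by
  induction l generalizing op val with
  | nil => simp
  | cons x xs ih =>
    simp only [List.foldl_cons, List.foldr_cons, ih]
    split_ifs <;> ring

-- ===== VERDICT (by name: the statement is the Claim_ definition above) =====
theorem Frame2Hex_spec : Claim_equal_Frame2Hex := by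
  intro frame _
  unfold Spec_Frame2Hex Frame2Hex Frame2Hex_alt
  rw [List.foldl_reverse]
  simpa using frame2hex_fold_eq (PySem.List.slice frame (some 1) none) 1 0
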